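-- pv_equiv track=rewrite | github.com/jekrch/comic-snaps | scripts/metadata/sources/__init__.py | pick_exact_match
-- ===== SOURCE A (Python) =====
-- def pick_exact_match(results: list, name: str, tiebreak_key: str | None = None) -> dict | None:
--     """
--     Pick the result whose name matches `name` case-insensitively.
--
--     If multiple exact matches exist and `tiebreak_key` is provided, pick the
--     one with the highest numeric value for that key (e.g. count_of_issues).
--     Returns None if no exact match.
--     """
--     norm = name.strip().lower()
--     exact = [r for r in results if (r.get("name") or "").strip().lower() == norm]
--     if not exact:
--         return None
--     if len(exact) == 1 or not tiebreak_key: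
--         return exact[0]
--     return max(exact, key=lambda r: int(r.get(tiebreak_key) or 0))
-- ===== SOURCE B (Python) =====
-- def pick_exact_match(results: list, name: str, tiebreak_key: str | None = None) -> dict | None:
--     """Single fused pass: track the first exact match and, lazily, the best match by
--     the numeric tiebreak value (strict '>' keeps the earliest on ties, like max)."""
--     norm = name.strip().lower()
--     best = None
--     best_val = None
--     for r in results:
--         if (r.get("name") or "").strip().lower() == norm:
--             if best is None:
--                 best = r
--             elif tiebreak_key:
--                 if best_val is None:
--                     best_val = int(best.get(tiebreak_key) or 0)
--                 v = int(r.get(tiebreak_key) or 0)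
--                 if v > best_val:
--                     best, best_val = r, v
--     return best
-- ===== Notes on version B (the rewrite author's own statement) =====
-- stated objective: alternative
-- what changed: Replaces A's filter-comprehension plus a second max() scan with one fused loop over results that tracks the first match and lazily the best match by numeric tiebreak value (strict '>' keeps the earliest on ties), building no intermediate list.
import Mathlib
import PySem

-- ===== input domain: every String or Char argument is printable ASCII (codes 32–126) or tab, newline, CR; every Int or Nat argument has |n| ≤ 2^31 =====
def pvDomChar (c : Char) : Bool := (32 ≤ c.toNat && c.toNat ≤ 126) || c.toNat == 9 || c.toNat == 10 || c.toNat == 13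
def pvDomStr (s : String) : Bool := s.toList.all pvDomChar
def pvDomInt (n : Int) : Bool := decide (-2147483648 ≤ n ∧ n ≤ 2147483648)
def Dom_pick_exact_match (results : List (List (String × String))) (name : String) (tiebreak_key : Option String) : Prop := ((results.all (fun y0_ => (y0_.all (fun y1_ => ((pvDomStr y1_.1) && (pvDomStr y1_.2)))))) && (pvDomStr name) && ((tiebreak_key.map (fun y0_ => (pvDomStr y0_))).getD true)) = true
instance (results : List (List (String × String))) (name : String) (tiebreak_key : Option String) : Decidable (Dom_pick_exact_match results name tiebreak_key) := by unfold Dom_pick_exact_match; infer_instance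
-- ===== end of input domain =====

-- ===== PORT A =====
-- B fuses A's filter pass and max pass into one loop; objective: alternative (single traversal, no intermediate list).
-- shared helpers: the normalised-name expression, int(r.get(k) or 0) (total via getD 0; Pre_ excludes the
-- ValueError inputs), and A's `exact` list of case-insensitive name matches
def pvNameNorm (r : List (String × String)) : String :=
  PySem.Str.lower (PySem.Str.strip ((PySem.Dict.get? (PySem.Dict.mk r) "name").getD ""))

def pvTieVal (tiebreak_key : Option String) (r : List (String × String)) : Int :=
  match PySem.Dict.get? (PySem.Dict.mk r) (tiebreak_key.getD "") with
  | none => 0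
  | some s => if s = "" then 0 else (PySem.Int.ofStr? s).getD 0

def pvExact (results : List (List (String × String))) (name : String) : List (List (String × String)) :=
  results.filter (fun r => pvNameNorm r == PySem.Str.lower (PySem.Str.strip name))

def pick_exact_match (results : List (List (String × String))) (name : String) (tiebreak_key : Option String) : Option (List (String × String)) :=
  if pvExact results name = [] then none
  else if (pvExact results name).length = 1 ∨ tiebreak_key = none ∨ tiebreak_key = some "" then
    PySem.List.pyGet? (pvExact results name) 0
  else
    PySem.List.max? (pvExact results name) (fun r => pvTieVal tiebreak_key r)

-- ===== PORT B =====
-- the body of B's single loop (one iteration on a matching element), and the guarded step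
def pvBodyB (tiebreak_key : Option String) (st : Option (List (String × String)) × Option Int) (r : List (String × String)) : Option (List (String × String)) × Option Int :=
  match st.1 with
  | none => (some r, st.2)
  | some best =>
    if tiebreak_key = none ∨ tiebreak_key = some "" then st
    else
      let bv := match st.2 with | none => pvTieVal tiebreak_key best | some v => v
      let v := pvTieVal tiebreak_key r
      if bv < v then (some r, some v) else (some best, some bv)

def pvStepB (norm : String) (tiebreak_key : Option String) (st : Option (List (String × String)) × Option Int) (r : List (String × String)) : Option (List (String × String)) × Option Int :=
  if pvNameNorm r == norm then pvBodyB tiebreak_key st r else st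

def pick_exact_match_alt (results : List (List (String × String))) (name : String) (tiebreak_key : Option String) : Option (List (String × String)) :=
  (results.foldl (pvStepB (PySem.Str.lower (PySem.Str.strip name)) tiebreak_key) (none, none)).1

-- ===== PRECONDITION & SPEC =====
-- Pre_ excludes exactly the inputs where the Python raises ValueError: a truthy tiebreak_key,
-- at least two exact name matches, and some match whose tiebreak value is a non-empty string
-- that is not a valid int literal (both A and B raise there).
def Pre_pick_exact_match (results : List (List (String × String))) (name : String) (tiebreak_key : Option String) : Prop :=
  (tiebreak_key = none ∨ tiebreak_key = some "") ∨
  (pvExact results name).length ≤ 1 ∨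
  ∀ r ∈ results, pvNameNorm r = PySem.Str.lower (PySem.Str.strip name) →
    ∀ s, PySem.Dict.get? (PySem.Dict.mk r) (tiebreak_key.getD "") = some s → s ≠ "" →
      (PySem.Int.ofStr? s).isSome = true
instance (results : List (List (String × String))) (name : String) (tiebreak_key : Option String) : Decidable (Pre_pick_exact_match results name tiebreak_key) := by unfold Pre_pick_exact_match; infer_instance

def pvWitness_pick_exact_match : (List (List (String × String))) × String × Option String :=
  ([[("name", "Ab"), ("k", "2")], [("name", " ab"), ("k", "10")]], "AB ", some "k")

def Spec_pick_exact_match (results : List (List (String × String))) (name : String) (tiebreak_key : Option String) (out : Option (List (String × String))) : Prop := out = pick_exact_match_alt results name tiebreak_key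
instance (results : List (List (String × String))) (name : String) (tiebreak_key : Option String) (out : Option (List (String × String))) : Decidable (Spec_pick_exact_match results name tiebreak_key out) := by unfold Spec_pick_exact_match; infer_instance

-- ===== CLAIM (what is proved, stated in full; the proofs are below) =====
def Claim_equal_pick_exact_match : Prop := ∀ (results : List (List (String × String))) (name : String) (tiebreak_key : Option String), Dom_pick_exact_match results name tiebreak_key → Pre_pick_exact_match results name tiebreak_key → Spec_pick_exact_match results name tiebreak_key (pick_exact_match results name tiebreak_key)

-- ===== LEMMAS AND PROOFS =====
theorem pvWitness_ok : Dom_pick_exact_match pvWitness_pick_exact_match.1 pvWitness_pick_exact_match.2.1 pvWitness_pick_exact_match.2.2 ∧ Pre_pick_exact_match pvWitness_pick_exact_match.1 pvWitness_pick_exact_match.2.1 pvWitness_pick_exact_match.2.2 := by decide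

-- B's guarded loop over all results is its unguarded body over A's `exact` list
theorem foldl_stepB_eq (results : List (List (String × String))) (name : String) (tiebreak_key : Option String) (init : Option (List (String × String)) × Option Int) :
    results.foldl (pvStepB (PySem.Str.lower (PySem.Str.strip name)) tiebreak_key) init
      = (pvExact results name).foldl (pvBodyB tiebreak_key) init :=
  PySem.List.foldl_if_eq_foldl_filter (fun r => pvNameNorm r == PySem.Str.lower (PySem.Str.strip name)) (pvBodyB tiebreak_key) results init

-- the running max over the tiebreak projection, non-optional accumulator
def pvMaxFrom (key : List (String × String) → Int) (b : List (String × String)) (t : List (List (String × String))) : List (String × String) :=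
  t.foldl (fun m r => if key m < key r then r else m) b

theorem max?_eq_some_maxFrom (key : List (String × String) → Int) (b : List (String × String)) (t : List (List (String × String))) :
    PySem.List.max? (b :: t) key = some (pvMaxFrom key b t) := by
  simp only [PySem.List.max?, List.foldl_cons]
  induction t generalizing b with
  | nil => simp [pvMaxFrom]
  | cons r t ih =>
    simp only [List.foldl_cons, pvMaxFrom]
    by_cases h : key b < key r <;> simp [h, ih, pvMaxFrom]

-- B's loop body, from a matched state with a truthy key, is the running strict-greater max
theorem foldB_truthy (tiebreak_key : Option String)
    (hk : ¬ (tiebreak_key = none ∨ tiebreak_key = some "")) :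
    ∀ (t : List (List (String × String))) (b : List (String × String)) (v? : Option Int),
      (v? = none ∨ v? = some (pvTieVal tiebreak_key b)) →
      (t.foldl (pvBodyB tiebreak_key) (some b, v?)).1 = some (pvMaxFrom (pvTieVal tiebreak_key) b t) := by
  intro t
  induction t with
  | nil => intro b v? _; simp [pvMaxFrom]
  | cons r t ih =>
    intro b v? hv
    rcases hv with rfl | rfl <;>
    · simp only [List.foldl_cons, pvBodyB, if_neg hk]
      by_cases h : pvTieVal tiebreak_key b < pvTieVal tiebreak_key r
      · rw [if_pos h, ih r (some (pvTieVal tiebreak_key r)) (Or.inr rfl)]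
        simp [pvMaxFrom, h]
      · rw [if_neg h, ih b (some (pvTieVal tiebreak_key b)) (Or.inr rfl)]
        simp [pvMaxFrom, h]

-- with a falsy tiebreak key the loop never moves off the first match
theorem foldB_falsy (tiebreak_key : Option String)
    (hk : tiebreak_key = none ∨ tiebreak_key = some "") :
    ∀ (t : List (List (String × String))) (b : List (String × String)) (v? : Option Int),
      (t.foldl (pvBodyB tiebreak_key) (some b, v?)).1 = some b := by
  intro t
  induction t with
  | nil => intro b v?; simp
  | cons r t ih => intro b v?; simp only [List.foldl_cons, pvBodyB, if_pos hk]; exact ih b v?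

-- ===== VERDICT (by name: the statement is the Claim_ definition above) =====
theorem pick_exact_match_spec : Claim_equal_pick_exact_match := by
  intro results name tiebreak_key _ _
  unfold Spec_pick_exact_match pick_exact_match pick_exact_match_alt
  rw [foldl_stepB_eq]
  cases hE : pvExact results name with
  | nil => simp
  | cons x t =>
    simp only [List.foldl_cons, pvBodyB]
    by_cases hk : tiebreak_key = none ∨ tiebreak_key = some ""
    · rw [foldB_falsy tiebreak_key hk t x none]
      simp [hk]
    · cases t with
      | nil =>
        simp
      | cons y u =>
        rw [foldB_truthy tiebreak_key hk (y :: u) x none (Or.inl rfl)]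
        have hlen : ¬ ((x :: y :: u : List (List (String × String))).length = 1 ∨ tiebreak_key = none ∨ tiebreak_key = some "") := by
          simp [hk]
        rw [if_neg (by simp : ¬ (x :: y :: u : List (List (String × String))) = []), if_neg hlen, max?_eq_some_maxFrom]
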